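-- pv_equiv track=rewrite | github.com/sevibogdanov/mtools | async_geo.py | ranges_list
-- ===== SOURCE A (Python) =====
-- def ranges_list(df_len, parts):
--     '''функция готовит список [start,end] согласно желаемому числу процессов по обработке'''
--     range_list = []
--     start = 0
--     iter = df_len // parts
--     last_part = df_len % parts
--
--     for each in range(parts):
--         if each == parts - 1:
--             range_list.append([start, start + iter + last_part])
--         else:
--             range_list.append([start, start + iter])
--             start += iter
--     return range_list
-- ===== SOURCE B (Python) =====
-- def ranges_list(df_len, parts):
--     '''same result via an explicit boundary table paired consecutively'''
--     it = df_len // parts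
--     boundaries = [i * it for i in range(parts)] + [df_len]
--     return [[a, b] for a, b in zip(boundaries, boundaries[1:])]
-- ===== Notes on version B (the rewrite author's own statement) =====
-- stated objective: alternative
-- what changed: Replaces A's accumulator-threaded loop (running start mutated each iteration) by computing the boundary table [i*(df_len//parts) for i in range(parts)] + [df_len] first and then pairing consecutive boundaries with zip.
import Mathlib
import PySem

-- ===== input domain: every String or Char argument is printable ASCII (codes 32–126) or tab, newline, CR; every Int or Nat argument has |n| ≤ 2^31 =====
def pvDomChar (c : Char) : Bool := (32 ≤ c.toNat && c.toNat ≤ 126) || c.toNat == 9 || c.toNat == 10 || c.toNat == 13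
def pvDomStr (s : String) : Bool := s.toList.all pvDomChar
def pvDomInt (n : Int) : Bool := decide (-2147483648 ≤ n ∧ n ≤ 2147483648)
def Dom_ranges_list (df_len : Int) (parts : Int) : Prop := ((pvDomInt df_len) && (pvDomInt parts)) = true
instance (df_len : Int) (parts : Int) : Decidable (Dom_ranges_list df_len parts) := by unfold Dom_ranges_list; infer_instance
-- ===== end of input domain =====

-- B computes the split boundaries as a table first and pairs consecutive entries with zip,
-- instead of A's loop threading a running start; same cost, different decomposition.

-- ===== PORT A =====
def ranges_list (df_len : Int) (parts : Int) : List (List Int) :=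
  let iter := PySem.Int.floordiv df_len parts
  let last_part := PySem.Int.mod df_len parts
  let st := (PySem.List.pyRange 0 parts 1).foldl
    (fun (st : List (List Int) × Int) each =>
      if each = parts - 1 then (st.1 ++ [[st.2, st.2 + iter + last_part]], st.2)
      else (st.1 ++ [[st.2, st.2 + iter]], st.2 + iter)) ([], 0)
  st.1

-- ===== PORT B =====
def ranges_list_alt (df_len : Int) (parts : Int) : List (List Int) :=
  let it := PySem.Int.floordiv df_len parts
  let boundaries := (PySem.List.pyRange 0 parts 1).map (fun i => i * it) ++ [df_len]
  (boundaries.zip boundaries.tail).map (fun p => [p.1, p.2])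

-- ===== PRECONDITION & SPEC =====
-- Pre_ excludes exactly parts = 0, where Python's df_len // parts raises ZeroDivisionError.
def Pre_ranges_list (df_len : Int) (parts : Int) : Prop := parts ≠ 0
instance (df_len : Int) (parts : Int) : Decidable (Pre_ranges_list df_len parts) := by unfold Pre_ranges_list; infer_instance
def pvWitness_ranges_list : Int × Int := (10, 3)

def Spec_ranges_list (df_len : Int) (parts : Int) (out : List (List Int)) : Prop := out = ranges_list_alt df_len parts
instance (df_len : Int) (parts : Int) (out : List (List Int)) : Decidable (Spec_ranges_list df_len parts out) := by unfold Spec_ranges_list; infer_instance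

-- ===== CLAIM (what is proved, stated in full; the proofs are below) =====
def Claim_equal_ranges_list : Prop := ∀ (df_len : Int) (parts : Int), Dom_ranges_list df_len parts → Pre_ranges_list df_len parts → Spec_ranges_list df_len parts (ranges_list df_len parts)

-- ===== LEMMAS AND PROOFS =====

-- closed form for A's loop over the prefix range(m) with m ≤ parts-1 (else-branch only)
theorem ranges_list_loop_prefix (iter last_part parts : Int) (m : Nat) (hm : (m : Int) ≤ parts - 1) :
    (PySem.List.pyRange 0 (m : Int) 1).foldl
      (fun (st : List (List Int) × Int) each =>
        if each = parts - 1 then (st.1 ++ [[st.2, st.2 + iter + last_part]], st.2)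
        else (st.1 ++ [[st.2, st.2 + iter]], st.2 + iter)) ([], 0)
    = ((List.range m).map (fun i => [(i : Int) * iter, ((i : Int) + 1) * iter]), (m : Int) * iter) := by
  induction m with
  | zero => simp [PySem.List.pyRange_one_eq_nil]
  | succ k ih =>
    have hk : (k : Int) ≤ parts - 1 := by push_cast at hm ⊢; omega
    have hne : (k : Int) ≠ parts - 1 := by push_cast at hm; omega
    have hsucc : ((k + 1 : Nat) : Int) = (k : Int) + 1 := by push_cast; ring
    rw [hsucc, PySem.List.pyRange_one_succ_right (by positivity), List.foldl_append, ih hk]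
    simp [hne, List.range_succ]
    ring

-- consecutive pairing of (range (n+1)).map g ++ [d] via zip with the tail
theorem zip_tail_pairs (g : Nat → Int) (n : Nat) (d : Int) :
    ((((List.range (n+1)).map g ++ [d]).zip ((List.range (n+1)).map g ++ [d]).tail).map
        (fun p => [p.1, p.2]))
    = (List.range n).map (fun i => [g i, g (i+1)]) ++ [[g n, d]] := by
  induction n generalizing g with
  | zero => simp [List.range_succ]
  | succ k ih =>
    have h2 : List.range (k+2) = 0 :: (List.range (k+1)).map Nat.succ := List.range_succ_eq_map
    have h1 : List.range (k+1) = 0 :: (List.range k).map Nat.succ := List.range_succ_eq_map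
    have ih' := ih (fun i => g (i + 1))
    rw [h2]
    simp only [List.map_cons, List.map_map, List.cons_append, List.tail_cons]
    have hcomp : (List.range (k+1)).map (g ∘ Nat.succ) = (List.range (k+1)).map (fun i => g (i+1)) := by
      simp [Function.comp, Nat.succ_eq_add_one]
    rw [hcomp]
    have hhead : (List.range (k+1)).map (fun i => g (i+1)) ++ [d] =
        g 1 :: ((List.range k).map (fun i => g (i+1+1)) ++ [d]) := by
      rw [h1]; simp [Nat.succ_eq_add_one, List.map_map, Function.comp]
    have htail : ((List.range (k+1)).map (fun i => g (i+1)) ++ [d]).tail =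
        (List.range k).map (fun i => g (i+1+1)) ++ [d] := by
      rw [hhead]; rfl
    rw [htail] at ih'
    rw [hhead, List.zip_cons_cons, List.map_cons, ← hhead]
    rw [ih', h1]
    simp [Nat.succ_eq_add_one, List.map_map, Function.comp]

-- ===== VERDICT (by name: the statement is the Claim_ definition above) =====
theorem ranges_list_spec : Claim_equal_ranges_list := by
  intro df_len parts _ hpre
  unfold Spec_ranges_list ranges_list ranges_list_alt
  dsimp only
  by_cases hpos : 0 < parts
  · obtain ⟨m, hm⟩ : ∃ m : Nat, parts = (m : Int) + 1 := ⟨(parts - 1).toNat, by omega⟩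
    subst hm
    set iter := PySem.Int.floordiv df_len ((m : Int) + 1) with hiter
    set last_part := PySem.Int.mod df_len ((m : Int) + 1) with hlast
    have hsum : (m : Int) * iter + iter + last_part = df_len := by
      have := PySem.Int.floordiv_mul_add_mod df_len ((m : Int) + 1)
      rw [← hiter, ← hlast] at this
      nlinarith [this]
    -- B side: rewrite the boundary table and pair it
    have hB : (PySem.List.pyRange 0 ((m : Int) + 1) 1).map (fun i => i * iter)
        = (List.range (m+1)).map (fun k : Nat => (k : Int) * iter) := by
      rw [PySem.List.pyRange_one]
      norm_num [List.map_map, Function.comp]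
    rw [hB, zip_tail_pairs (fun k : Nat => (k : Int) * iter) m df_len]
    -- A side: split off the last iteration and use the prefix closed form
    have hr : PySem.List.pyRange 0 ((m : Int) + 1) 1
        = PySem.List.pyRange 0 (m : Int) 1 ++ [(m : Int)] :=
      PySem.List.pyRange_one_succ_right (by positivity)
    rw [hr, List.foldl_append,
      ranges_list_loop_prefix iter last_part ((m : Int) + 1) m (by omega)]
    have hc : (m : Int) = (m : Int) + 1 - 1 := by omega
    simp only [List.foldl_cons, List.foldl_nil, if_pos hc]
    rw [hsum]
    congr 1
    simp only [List.pure_def, List.bind_eq_flatMap]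
    rw [← List.map_eq_flatMap, List.map_map]
    apply List.map_congr_left
    intro i _
    simp only [Function.comp_apply]
    push_cast
    ring_nf
  · have hle : parts ≤ 0 := by omega
    rw [PySem.List.pyRange_one_eq_nil (by omega)]
    simp
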